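-- pv_equiv track=rewrite | github.com/mushkevych/launch.py | system/time_helper.py | define_pattern
-- ===== SOURCE A (Python) =====
-- def define_pattern(timestamp):
--     hasYear = False
--     hasMonth = False
--     hasDay = False
--     hasHour = False
--
--     for index in range(0, len(timestamp)):
--         if index >= 0 and index < 4 and timestamp[index] != '0':
--             hasYear = True
--         elif index >= 4 and index < 6 and timestamp[index] != '0':
--             hasMonth = True
--         elif index >= 6 and index < 8 and timestamp[index] != '0':
--             hasDay = True
--         elif index >= 8 and timestamp[index] != '0':
--             hasHour = True
--
--     pattern = ''
--     if hasYear: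
--         pattern += '%Y'
--     else:
--         pattern += '0000'
--     if hasMonth:
--         pattern += '%m'
--     else:
--         pattern += '00'
--     if hasDay:
--         pattern += '%d'
--     else:
--         pattern += '00'
--     if hasHour:
--         pattern += '%H'
--     else:
--         pattern += '00'
--
--     return pattern
-- ===== SOURCE B (Python) =====
-- def define_pattern(timestamp):
--     # prefix counts of non-'0' characters; a segment is nonzero iff the count
--     # grows across its boundaries
--     pre = [0]
--     for c in timestamp:
--         pre.append(pre[-1] + (c != '0'))
--     n = len(timestamp)
--     bounds = (0, 4, 6, 8, max(8, n))
--     tokens = (('%Y', '0000'), ('%m', '00'), ('%d', '00'), ('%H', '00'))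
--     out = []
--     for k in range(4):
--         if pre[min(bounds[k + 1], n)] > pre[min(bounds[k], n)]:
--             out.append(tokens[k][0])
--         else:
--             out.append(tokens[k][1])
--     return ''.join(out)
-- ===== Notes on version B (the rewrite author's own statement) =====
-- stated objective: alternative
-- what changed: Instead of classifying each index into one of four flag-setting branches, B builds a prefix-count array of non-'0' characters in one pass and decides each segment by differencing the counts at the fixed boundaries (0,4,6,8,max(8,n)), emitting token or filler per boundary pair.
import Mathlib
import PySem

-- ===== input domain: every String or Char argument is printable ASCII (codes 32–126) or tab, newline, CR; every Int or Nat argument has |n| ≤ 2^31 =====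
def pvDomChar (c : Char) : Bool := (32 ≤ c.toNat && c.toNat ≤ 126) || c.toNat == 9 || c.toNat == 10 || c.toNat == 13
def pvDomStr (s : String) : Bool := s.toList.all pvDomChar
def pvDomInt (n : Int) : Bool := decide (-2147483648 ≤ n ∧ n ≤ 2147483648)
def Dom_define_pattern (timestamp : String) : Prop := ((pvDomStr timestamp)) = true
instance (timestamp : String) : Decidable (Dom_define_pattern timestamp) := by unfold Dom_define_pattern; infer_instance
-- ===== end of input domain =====

-- B replaces A's index-classifying flag loop by a prefix-count array of non-'0'
-- characters, deciding each segment by differencing counts at fixed boundaries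
-- (objective: alternative algorithm, same cost).


-- ===== PORT A =====
-- loop body of A: the if/elif chain over one index; timestamp[index] is ported with
-- pyGetD (default never used: index is drawn from range(0, len(timestamp)), always in range)
def pvStepA (cs : List Char) (s : Bool × Bool × Bool × Bool) (i : Int) : Bool × Bool × Bool × Bool :=
  if 0 ≤ i ∧ i < 4 ∧ PySem.List.pyGetD cs i ' ' ≠ '0' then (true, s.2.1, s.2.2.1, s.2.2.2)
  else if 4 ≤ i ∧ i < 6 ∧ PySem.List.pyGetD cs i ' ' ≠ '0' then (s.1, true, s.2.2.1, s.2.2.2)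
  else if 6 ≤ i ∧ i < 8 ∧ PySem.List.pyGetD cs i ' ' ≠ '0' then (s.1, s.2.1, true, s.2.2.2)
  else if 8 ≤ i ∧ PySem.List.pyGetD cs i ' ' ≠ '0' then (s.1, s.2.1, s.2.2.1, true)
  else s

def define_pattern (timestamp : String) : String :=
  let cs := timestamp.toList
  let s := (PySem.List.pyRange 0 (PySem.List.len cs) 1).foldl (pvStepA cs) (false, false, false, false)
  String.ofList
    ((if s.1 then "%Y".toList else "0000".toList) ++
     (if s.2.1 then "%m".toList else "00".toList) ++
     (if s.2.2.1 then "%d".toList else "00".toList) ++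
     (if s.2.2.2 then "%H".toList else "00".toList))

-- ===== PORT B =====
-- Source B: pre = prefix counts of non-'0' chars (pre[-1] ported as getLastD 0);
-- then for k in range(4), compare counts at the two boundaries of segment k
def define_pattern_alt (timestamp : String) : String :=
  let cs := timestamp.toList
  let pre : List Nat := cs.foldl (fun p c => p ++ [p.getLastD 0 + (if c != '0' then 1 else 0)]) [0]
  let n := cs.length
  let bounds : List Nat := [0, 4, 6, 8, max 8 n]
  let tokens : List (List Char × List Char) :=
    [("%Y".toList, "0000".toList), ("%m".toList, "00".toList),
     ("%d".toList, "00".toList), ("%H".toList, "00".toList)]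
  let out := (List.range 4).foldl (fun out k =>
      if pre.getD (min (bounds.getD (k + 1) 0) n) 0 > pre.getD (min (bounds.getD k 0) n) 0
      then out ++ (tokens.getD k ([], [])).1
      else out ++ (tokens.getD k ([], [])).2) []
  String.ofList out

-- ===== PRECONDITION & SPEC =====
def Spec_define_pattern (timestamp : String) (out : String) : Prop := out = define_pattern_alt timestamp
instance (timestamp : String) (out : String) : Decidable (Spec_define_pattern timestamp out) := by unfold Spec_define_pattern; infer_instance

-- ===== CLAIM (what is proved, stated in full; the proofs are below) =====
def Claim_equal_define_pattern : Prop := ∀ (timestamp : String), Dom_define_pattern timestamp → Spec_define_pattern timestamp (define_pattern timestamp)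

-- ===== LEMMAS AND PROOFS =====

-- the four disjoint index conditions of A's if/elif chain, as Bool tests on one index
def pvCY (cs : List Char) (i : Int) : Bool := decide (0 ≤ i ∧ i < 4 ∧ PySem.List.pyGetD cs i ' ' ≠ '0')
def pvCM (cs : List Char) (i : Int) : Bool := decide (4 ≤ i ∧ i < 6 ∧ PySem.List.pyGetD cs i ' ' ≠ '0')
def pvCD (cs : List Char) (i : Int) : Bool := decide (6 ≤ i ∧ i < 8 ∧ PySem.List.pyGetD cs i ' ' ≠ '0')
def pvCH (cs : List Char) (i : Int) : Bool := decide (8 ≤ i ∧ PySem.List.pyGetD cs i ' ' ≠ '0')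

-- the elif branches fire on disjoint index ranges, so one step is a componentwise or
lemma pvStepA_or (cs : List Char) (s : Bool × Bool × Bool × Bool) (i : Int) :
    pvStepA cs s i = (s.1 || pvCY cs i, s.2.1 || pvCM cs i, s.2.2.1 || pvCD cs i, s.2.2.2 || pvCH cs i) := by
  unfold pvStepA pvCY pvCM pvCD pvCH
  split_ifs with h1 h2 h3 h4 <;>
    refine Prod.ext ?_ (Prod.ext ?_ (Prod.ext ?_ ?_)) <;> simp_all <;> omega

lemma pvFoldA (cs : List Char) (l : List Int) (s : Bool × Bool × Bool × Bool) :
    l.foldl (pvStepA cs) s =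
      (s.1 || l.any (pvCY cs), s.2.1 || l.any (pvCM cs), s.2.2.1 || l.any (pvCD cs), s.2.2.2 || l.any (pvCH cs)) := by
  induction l generalizing s with
  | nil => simp
  | cons x xs ih =>
    rw [List.foldl_cons, pvStepA_or, ih]
    simp [Bool.or_assoc]

-- index-scan over the whole list with a bounded window [a, b) = scan of the slice
lemma pvSeg_any (cs : List Char) (a b : Nat) :
    (List.range cs.length).any (fun k => decide ((a : Int) ≤ (k : Int) ∧ (k : Int) < (b : Int) ∧ PySem.List.pyGetD cs (k : Int) ' ' ≠ '0'))
      = ((cs.drop a).take (b - a)).any (fun c => c != '0') := by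
  rw [Bool.eq_iff_iff]
  simp only [List.any_eq_true, List.mem_range, decide_eq_true_eq, PySem.List.pyGetD_natCast,
    bne_iff_ne]
  constructor
  · rintro ⟨k, hk, ha, hb, hne⟩
    have ha' : a ≤ k := by exact_mod_cast ha
    have hb' : k < b := by exact_mod_cast hb
    have hlen : k - a < ((cs.drop a).take (b - a)).length := by
      simp only [List.length_take, List.length_drop, lt_min_iff]; omega
    refine ⟨cs[k]'hk, ?_, ?_⟩
    · rw [List.mem_iff_getElem]
      refine ⟨k - a, hlen, ?_⟩
      rw [List.getElem_take, List.getElem_drop]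
      congr 1; omega
    · rw [List.getD_eq_getElem?_getD, List.getElem?_eq_getElem hk] at hne
      simpa using hne
  · rintro ⟨c, hc, hne⟩
    rw [List.mem_iff_getElem] at hc
    obtain ⟨j, hj, hcj⟩ := hc
    have hj' := hj
    simp only [List.length_take, List.length_drop, lt_min_iff] at hj'
    refine ⟨a + j, by omega, by push_cast; omega, by push_cast; omega, ?_⟩
    rw [List.getElem_take, List.getElem_drop] at hcj
    rw [List.getD_eq_getElem?_getD, List.getElem?_eq_getElem (by omega : a + j < cs.length)]
    simpa [hcj] using hne

-- the same for the unbounded tail window [a, ∞)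
lemma pvTail_any (cs : List Char) (a : Nat) :
    (List.range cs.length).any (fun k => decide ((a : Int) ≤ (k : Int) ∧ PySem.List.pyGetD cs (k : Int) ' ' ≠ '0'))
      = (cs.drop a).any (fun c => c != '0') := by
  rw [Bool.eq_iff_iff]
  simp only [List.any_eq_true, List.mem_range, decide_eq_true_eq, PySem.List.pyGetD_natCast,
    bne_iff_ne]
  constructor
  · rintro ⟨k, hk, ha, hne⟩
    have ha' : a ≤ k := by exact_mod_cast ha
    have hlen : k - a < (cs.drop a).length := by
      simp only [List.length_drop]; omega
    refine ⟨cs[k]'hk, ?_, ?_⟩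
    · rw [List.mem_iff_getElem]
      refine ⟨k - a, hlen, ?_⟩
      rw [List.getElem_drop]
      congr 1; omega
    · rw [List.getD_eq_getElem?_getD, List.getElem?_eq_getElem hk] at hne
      simpa using hne
  · rintro ⟨c, hc, hne⟩
    rw [List.mem_iff_getElem] at hc
    obtain ⟨j, hj, hcj⟩ := hc
    have hj' := hj
    simp only [List.length_drop] at hj'
    refine ⟨a + j, by omega, by push_cast; omega, ?_⟩
    rw [List.getElem_drop] at hcj
    rw [List.getD_eq_getElem?_getD, List.getElem?_eq_getElem (by omega : a + j < cs.length)]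
    simpa [hcj] using hne

-- B's prefix array is exactly the table of prefix counts of non-'0' characters
lemma pvPre_eq (cs : List Char) :
    cs.foldl (fun p c => p ++ [p.getLastD 0 + (if c != '0' then 1 else 0)]) [0]
      = (List.range (cs.length + 1)).map (fun i => (cs.take i).countP (fun c => c != '0')) := by
  induction cs using List.reverseRecOn with
  | nil => simp
  | append_singleton cs c ih =>
    rw [List.foldl_append, List.foldl_cons, List.foldl_nil, ih]
    have hlast :
        (((List.range (cs.length + 1)).map (fun i => (cs.take i).countP (fun c => c != '0'))).getLastD 0)
          = cs.countP (fun c => c != '0') := by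
      rw [List.range_succ, List.map_append]
      simp
    have hsplit : List.range (cs.length + 1 + 1) = List.range (cs.length + 1) ++ [cs.length + 1] :=
      List.range_succ
    rw [hlast, List.length_append, List.length_singleton, hsplit, List.map_append]
    congr 1
    · apply List.map_congr_left
      intro i hi
      rw [List.mem_range] at hi
      rw [List.take_append_of_le_length (by omega)]
    · have htake : (cs ++ [c]).take (cs.length + 1) = cs ++ [c] :=
        List.take_of_length_le (by simp)
      simp only [List.map_cons, List.map_nil, htake, List.countP_append]
      simp [List.countP_cons]

-- reading the prefix array at a clamped boundary is the count over take b
lemma pvPre_getD (cs : List Char) (b : Nat) :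
    ((List.range (cs.length + 1)).map (fun i => (cs.take i).countP (fun c => c != '0'))).getD
        (min b cs.length) 0
      = (cs.take b).countP (fun c => c != '0') := by
  have hlt : min b cs.length < cs.length + 1 := by omega
  rw [List.getD_eq_getElem?_getD, List.getElem?_map, List.getElem?_range hlt]
  rcases le_total b cs.length with h | h
  · simp [min_eq_left h]
  · simp [List.take_of_length_le, h]

-- the count grows across [a, b) iff the window holds a non-'0' character
lemma pvCount_lt (cs : List Char) (a b : Nat) (hab : a ≤ b) :
    ((cs.take a).countP (fun c => c != '0') < (cs.take b).countP (fun c => c != '0'))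
      ↔ ((cs.drop a).take (b - a)).any (fun c => c != '0') = true := by
  have h : cs.take b = cs.take a ++ (cs.drop a).take (b - a) := by
    rw [← List.take_add]; congr 1; omega
  rw [h, List.countP_append, List.any_eq_true]
  constructor
  · intro hlt
    have : 0 < ((cs.drop a).take (b - a)).countP (fun c => c != '0') := by omega
    rw [List.countP_pos_iff] at this
    exact this
  · intro hx
    have : 0 < ((cs.drop a).take (b - a)).countP (fun c => c != '0') :=
      List.countP_pos_iff.mpr hx
    omega

-- B's appending loop, flattened: foldl of conditional appends is a flatMap
lemma pvFoldB {alp bet : Type} (p : bet → Prop) [DecidablePred p] (f g : bet → List alp)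
    (l : List bet) (acc : List alp) :
    l.foldl (fun out k => if p k then out ++ f k else out ++ g k) acc
      = acc ++ l.flatMap (fun k => if p k then f k else g k) := by
  induction l generalizing acc with
  | nil => simp
  | cons x xs ih =>
    rw [List.foldl_cons, List.flatMap_cons]
    by_cases hx : p x <;> simp [hx, ih]

-- ===== VERDICT (by name: the statement is the Claim_ definition above) =====
theorem define_pattern_spec : Claim_equal_define_pattern := by
  intro timestamp _
  unfold Spec_define_pattern
  simp only [define_pattern, define_pattern_alt]
  set cs := timestamp.toList with hcs
  rw [PySem.List.len_eq, PySem.List.pyRange_zero_natCast, pvFoldA, pvPre_eq]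
  simp only [List.any_map, Function.comp_def, Bool.false_or]
  unfold pvCY pvCM pvCD pvCH
  rw [show ((List.range cs.length).any fun k => decide (0 ≤ (k : Int) ∧ (k : Int) < 4 ∧ PySem.List.pyGetD cs (k : Int) ' ' ≠ '0'))
        = ((cs.drop 0).take (4 - 0)).any (fun c => c != '0') from by
      rw [← pvSeg_any cs 0 4]; norm_num]
  rw [show ((List.range cs.length).any fun k => decide (4 ≤ (k : Int) ∧ (k : Int) < 6 ∧ PySem.List.pyGetD cs (k : Int) ' ' ≠ '0'))
        = ((cs.drop 4).take (6 - 4)).any (fun c => c != '0') from by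
      rw [← pvSeg_any cs 4 6]; norm_num]
  rw [show ((List.range cs.length).any fun k => decide (6 ≤ (k : Int) ∧ (k : Int) < 8 ∧ PySem.List.pyGetD cs (k : Int) ' ' ≠ '0'))
        = ((cs.drop 6).take (8 - 6)).any (fun c => c != '0') from by
      rw [← pvSeg_any cs 6 8]; norm_num]
  rw [show ((List.range cs.length).any fun k => decide (8 ≤ (k : Int) ∧ PySem.List.pyGetD cs (k : Int) ' ' ≠ '0'))
        = (cs.drop 8).any (fun c => c != '0') from by
      rw [← pvTail_any cs 8]; norm_num]
  rw [pvFoldB]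
  rw [show List.range 4 = [0, 1, 2, 3] from by decide]
  simp only [List.flatMap_cons, List.flatMap_nil, List.append_nil, List.nil_append]
  rw [show ([0, 4, 6, 8, max 8 cs.length] : List Nat).getD 0 0 = 0 from rfl,
      show ([0, 4, 6, 8, max 8 cs.length] : List Nat).getD 1 0 = 4 from rfl,
      show ([0, 4, 6, 8, max 8 cs.length] : List Nat).getD 2 0 = 6 from rfl,
      show ([0, 4, 6, 8, max 8 cs.length] : List Nat).getD 3 0 = 8 from rfl,
      show ([0, 4, 6, 8, max 8 cs.length] : List Nat).getD 4 0 = max 8 cs.length from rfl]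
  rw [pvPre_getD cs 0, pvPre_getD cs 4, pvPre_getD cs 6, pvPre_getD cs 8,
      pvPre_getD cs (max 8 cs.length)]
  have h1 := pvCount_lt cs 0 4 (by omega)
  have h2 := pvCount_lt cs 4 6 (by omega)
  have h3 := pvCount_lt cs 6 8 (by omega)
  have h4 := pvCount_lt cs 8 (max 8 cs.length) (by omega)
  have htail : ((cs.drop 8).take (max 8 cs.length - 8)) = cs.drop 8 := by
    apply List.take_of_length_le
    simp only [List.length_drop]; omega
  rw [htail] at h4
  simp only [gt_iff_lt, h1, h2, h3, h4]
  simp [List.append_assoc]
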